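-- pv_equiv track=rewrite | github.com/getzep/graphiti | core/utils/bulk_utils.py | compress_uuid_map
-- ===== SOURCE A (Python) =====
-- def compress_uuid_map(uuid_map: dict[str, str]) -> dict[str, str]:
--     # make sure all uuid values aren't mapped to other uuids
--     compressed_map = {}
--     for key, uuid in uuid_map.items():
--         curr_value = uuid
--         while curr_value in uuid_map.keys():
--             curr_value = uuid_map[curr_value]
--
--         compressed_map[key] = curr_value
--     return compressed_map
-- ===== SOURCE B (Python) =====
-- def compress_uuid_map(uuid_map: dict[str, str]) -> dict[str, str]:
--     # Memoized chain resolution with path compression: each chain is walked once.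
--     resolved: dict[str, str] = {}
--     compressed_map = {}
--     for key, uuid in uuid_map.items():
--         path = []
--         curr = uuid
--         while curr in uuid_map and curr not in resolved:
--             path.append(curr)
--             curr = uuid_map[curr]
--         end = resolved.get(curr, curr)
--         for node in path:
--             resolved[node] = end
--         compressed_map[key] = end
--     return compressed_map
-- ===== Notes on version B (the rewrite author's own statement) =====
-- stated objective: faster
-- what changed: B memoizes the resolved endpoint of every node it walks through (path compression), so each chain node is traversed once overall instead of re-walking the chain for every key.
import Mathlib
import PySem

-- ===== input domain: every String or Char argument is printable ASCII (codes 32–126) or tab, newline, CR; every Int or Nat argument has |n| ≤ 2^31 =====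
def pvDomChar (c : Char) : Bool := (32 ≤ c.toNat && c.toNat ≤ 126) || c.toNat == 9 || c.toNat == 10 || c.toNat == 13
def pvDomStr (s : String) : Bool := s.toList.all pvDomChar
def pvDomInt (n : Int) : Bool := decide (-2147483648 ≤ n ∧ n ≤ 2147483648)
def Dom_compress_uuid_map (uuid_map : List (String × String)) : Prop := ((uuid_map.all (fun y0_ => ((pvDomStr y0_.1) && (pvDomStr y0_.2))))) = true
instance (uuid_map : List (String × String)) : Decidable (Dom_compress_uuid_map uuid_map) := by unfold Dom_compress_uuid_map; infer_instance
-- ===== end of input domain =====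

-- B memoizes resolved endpoints (path compression) so each chain node is walked once; equivalence is about the return value (neither program mutates its argument).

-- ===== PORT A =====
-- A's `while curr_value in uuid_map.keys(): curr_value = uuid_map[curr_value]`:
-- the membership test plus subscript is one first-match lookup, ported as a single get? match.
-- The fuel argument only makes the loop total; under Pre_ it is never exhausted.
def pvChaseA (d : PySem.Dict String String) : Nat → String → String
  | 0, v => v
  | f + 1, v =>
    match d.get? v with
    | some w => pvChaseA d f w
    | none => v

def compress_uuid_map (uuid_map : List (String × String)) : List (String × String) :=
  let d : PySem.Dict String String := PySem.Dict.mk uuid_map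
  (uuid_map.foldl
    (fun (acc : PySem.Dict String String) (p : String × String) =>
      acc.insert p.1 (pvChaseA d (uuid_map.length + 1) p.2))
    PySem.Dict.empty).items

-- ===== PORT B =====
-- end = resolved.get(curr, curr); for node in path: resolved[node] = end
def pvFinishB (res : PySem.Dict String String) (v : String) (path : List String) :
    String × PySem.Dict String String :=
  let e := res.getD v v
  (e, path.foldl (fun (r : PySem.Dict String String) (p : String) => r.insert p e) res)

-- B's `while curr in uuid_map and curr not in resolved: path.append(curr); curr = uuid_map[curr]`;
-- fuel only makes the loop total, never exhausted under Pre_.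
def pvResolveB (d : PySem.Dict String String) :
    Nat → PySem.Dict String String → String → List String → String × PySem.Dict String String
  | 0, res, v, path => pvFinishB res v path
  | f + 1, res, v, path =>
    match d.get? v with
    | some w => if res.contains v then pvFinishB res v path else pvResolveB d f res w (path ++ [v])
    | none => pvFinishB res v path

def compress_uuid_map_alt (uuid_map : List (String × String)) : List (String × String) :=
  let d : PySem.Dict String String := PySem.Dict.mk uuid_map
  (uuid_map.foldl
    (fun (st : PySem.Dict String String × PySem.Dict String String) (p : String × String) =>
      let r := pvResolveB d (uuid_map.length + 1) st.1 p.2 []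
      (r.2, st.2.insert p.1 r.1))
    (PySem.Dict.empty, PySem.Dict.empty)).2.items

-- ===== PRECONDITION & SPEC =====
-- one step of the chain; absorbing (identity) outside the key set
def pvG (d : PySem.Dict String String) (x : String) : String := (d.get? x).getD x

-- Pre_ excludes inputs whose chain of uuid values runs into a cycle: there Python A's
-- while-loop (and B's) never terminates. On acyclic inputs every chain leaves the key
-- set within |uuid_map| steps, which is exactly this condition.
def Pre_compress_uuid_map (uuid_map : List (String × String)) : Prop :=
  ∀ p ∈ uuid_map,
    (PySem.Dict.mk uuid_map).get? ((pvG (PySem.Dict.mk uuid_map))^[uuid_map.length] p.2) = none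

instance (uuid_map : List (String × String)) : Decidable (Pre_compress_uuid_map uuid_map) := by
  unfold Pre_compress_uuid_map; infer_instance

def pvWitness_compress_uuid_map : (List (String × String)) := [("a", "b"), ("b", "c")]

def Spec_compress_uuid_map (uuid_map : List (String × String)) (out : List (String × String)) : Prop := out = compress_uuid_map_alt uuid_map
instance (uuid_map : List (String × String)) (out : List (String × String)) : Decidable (Spec_compress_uuid_map uuid_map out) := by unfold Spec_compress_uuid_map; infer_instance

-- ===== CLAIM (what is proved, stated in full; the proofs are below) =====
def Claim_equal_compress_uuid_map : Prop := ∀ (uuid_map : List (String × String)), Dom_compress_uuid_map uuid_map → Pre_compress_uuid_map uuid_map → Spec_compress_uuid_map uuid_map (compress_uuid_map uuid_map)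

-- ===== LEMMAS AND PROOFS =====

-- e is the endpoint of x's chain
def pvIsEnd (d : PySem.Dict String String) (x e : String) : Prop :=
  (∃ m, (pvG d)^[m] x = e) ∧ d.get? e = none

-- the memo invariant: every recorded entry is a true endpoint
def pvInv (d res : PySem.Dict String String) : Prop :=
  ∀ x e, res.get? x = some e → pvIsEnd d x e

theorem pvG_of_none {d : PySem.Dict String String} {x : String} (h : d.get? x = none) :
    pvG d x = x := by simp [pvG, h]

theorem pvIterate_of_none {d : PySem.Dict String String} {x : String} (h : d.get? x = none)
    (m : Nat) : (pvG d)^[m] x = x := by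
  induction m with
  | zero => rfl
  | succ m ih => rw [Function.iterate_succ_apply', ih, pvG_of_none h]

theorem pvStable {d : PySem.Dict String String} {x : String} {m : Nat}
    (h : d.get? ((pvG d)^[m] x) = none) (j : Nat) :
    (pvG d)^[m + j] x = (pvG d)^[m] x := by
  rw [Nat.add_comm, Function.iterate_add_apply]
  exact pvIterate_of_none h j

theorem pvIsEnd_unique {d : PySem.Dict String String} {x e e' : String}
    (h1 : pvIsEnd d x e) (h2 : pvIsEnd d x e') : e = e' := by
  obtain ⟨⟨m, hm⟩, he⟩ := h1
  obtain ⟨⟨m', hm'⟩, he'⟩ := h2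
  rcases Nat.le_total m m' with hle | hle
  · have := pvStable (x := x) (m := m) (by rw [hm]; exact he) (m' - m)
    rw [Nat.add_sub_cancel' hle, hm, hm'] at this
    exact this.symm
  · have := pvStable (x := x) (m := m') (by rw [hm']; exact he') (m - m')
    rw [Nat.add_sub_cancel' hle, hm, hm'] at this
    exact this

theorem pvIsEnd_of_reach {d : PySem.Dict String String} {p v e : String}
    (h : ∃ m, (pvG d)^[m] p = v) (he : pvIsEnd d v e) : pvIsEnd d p e := by
  obtain ⟨m, hm⟩ := h
  obtain ⟨⟨k, hk⟩, hnone⟩ := he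
  exact ⟨⟨k + m, by rw [Function.iterate_add_apply, hm, hk]⟩, hnone⟩

theorem pvInv_empty (d : PySem.Dict String String) : pvInv d PySem.Dict.empty := by
  intro x e h
  simp [PySem.Dict.get?_empty] at h

theorem pvInv_foldl_insert {d res : PySem.Dict String String} {e : String} {path : List String}
    (hi : pvInv d res) (hp : ∀ p ∈ path, pvIsEnd d p e) :
    pvInv d (path.foldl (fun (r : PySem.Dict String String) (p : String) => r.insert p e) res) := by
  induction path generalizing res with
  | nil => exact hi
  | cons a t ih =>
    simp only [List.foldl_cons]
    refine ih ?_ (fun p hp' => hp p (List.mem_cons_of_mem _ hp'))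
    intro x e' hx
    by_cases hxa : x = a
    · subst hxa
      rw [PySem.Dict.get?_insert_self] at hx
      cases hx
      exact hp x List.mem_cons_self
    · rw [PySem.Dict.get?_insert_of_ne res e hxa] at hx
      exact hi x e' hx

theorem pvChaseA_eq {d : PySem.Dict String String} {f : Nat} {v : String}
    (h : d.get? ((pvG d)^[f] v) = none) : pvChaseA d f v = (pvG d)^[f] v := by
  induction f generalizing v with
  | zero => rfl
  | succ f ih =>
    unfold pvChaseA
    cases hv : d.get? v with
    | none => simp [pvIterate_of_none hv]
    | some w =>
      have hgv : pvG d v = w := by simp [pvG, hv]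
      have h' : d.get? ((pvG d)^[f] w) = none := by
        rw [← hgv, ← Function.iterate_succ_apply]; exact h
      rw [Function.iterate_succ_apply, hgv]
      exact ih h'

theorem pvFinishB_spec {d res : PySem.Dict String String} {v : String} {path : List String}
    (hi : pvInv d res)
    (hv : d.get? v = none ∨ ∃ e0, res.get? v = some e0)
    (hpath : ∀ p ∈ path, ∃ m, (pvG d)^[m] p = v) :
    pvIsEnd d v (pvFinishB res v path).1 ∧ pvInv d (pvFinishB res v path).2 := by
  have hend : pvIsEnd d v (res.getD v v) := by
    cases hr : res.get? v with
    | some e0 =>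
      rw [PySem.Dict.getD_of_get?_eq_some res v hr]
      exact hi v e0 hr
    | none =>
      rw [PySem.Dict.getD_of_get?_eq_none res v hr]
      rcases hv with h | ⟨e0, h0⟩
      · exact ⟨⟨0, rfl⟩, h⟩
      · rw [hr] at h0; cases h0
  exact ⟨hend, pvInv_foldl_insert hi (fun p hp => pvIsEnd_of_reach (hpath p hp) hend)⟩

theorem pvResolveB_spec {d : PySem.Dict String String} :
    ∀ (f : Nat) (res : PySem.Dict String String) (v : String) (path : List String),
    pvInv d res → d.get? ((pvG d)^[f] v) = none →
    (∀ p ∈ path, ∃ m, (pvG d)^[m] p = v) →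
    pvIsEnd d v (pvResolveB d f res v path).1 ∧ pvInv d (pvResolveB d f res v path).2 := by
  intro f
  induction f with
  | zero =>
    intro res v path hi h hpath
    exact pvFinishB_spec hi (Or.inl h) hpath
  | succ f ih =>
    intro res v path hi h hpath
    unfold pvResolveB
    cases hv : d.get? v with
    | none => exact pvFinishB_spec hi (Or.inl hv) hpath
    | some w =>
      simp only []
      by_cases hc : res.contains v
      · rw [if_pos hc]
        have : ∃ e0, res.get? v = some e0 := by
          rw [PySem.Dict.contains_eq_isSome_get?] at hc
          exact Option.isSome_iff_exists.mp hc
        exact pvFinishB_spec hi (Or.inr this) hpath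
      · rw [if_neg hc]
        have hgv : pvG d v = w := by simp [pvG, hv]
        have h' : d.get? ((pvG d)^[f] w) = none := by
          rw [← hgv, ← Function.iterate_succ_apply]; exact h
        have hpath' : ∀ p ∈ path ++ [v], ∃ m, (pvG d)^[m] p = w := by
          intro p hp
          rcases List.mem_append.mp hp with hp | hp
          · obtain ⟨m, hm⟩ := hpath p hp
            exact ⟨m + 1, by rw [Function.iterate_succ_apply', hm, hgv]⟩
          · rw [List.mem_singleton] at hp
            subst hp
            exact ⟨1, by simp [hgv]⟩
        have := ih res w (path ++ [v]) hi h' hpath'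
        constructor
        · refine pvIsEnd_of_reach ⟨0, rfl⟩ ?_
          refine ⟨?_, this.1.2⟩
          obtain ⟨m, hm⟩ := this.1.1
          refine ⟨m + 1, ?_⟩
          simp only [Function.iterate_zero_apply]
          rw [show (pvG d)^[m + 1] v = (pvG d)^[m] (pvG d v) from Function.iterate_succ_apply _ _ _, hgv, hm]
        · exact this.2

theorem pvFold_eq {d : PySem.Dict String String} (N : Nat) :
    ∀ (l : List (String × String)) (res out : PySem.Dict String String),
    pvInv d res → (∀ p ∈ l, d.get? ((pvG d)^[N] p.2) = none) →
    l.foldl (fun (acc : PySem.Dict String String) (p : String × String) =>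
        acc.insert p.1 (pvChaseA d N p.2)) out
      = (l.foldl (fun (st : PySem.Dict String String × PySem.Dict String String)
          (p : String × String) =>
          let r := pvResolveB d N st.1 p.2 []
          (r.2, st.2.insert p.1 r.1)) (res, out)).2 := by
  intro l
  induction l with
  | nil => intro res out _ _; rfl
  | cons p t ih =>
    intro res out hi hl
    have hesc := hl p List.mem_cons_self
    have hr := pvResolveB_spec N res p.2 [] hi hesc (by simp)
    have hA : pvChaseA d N p.2 = (pvResolveB d N res p.2 []).1 := by
      rw [pvChaseA_eq hesc]
      exact pvIsEnd_unique ⟨⟨N, rfl⟩, hesc⟩ hr.1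
    simp only [List.foldl_cons]
    rw [hA]
    exact ih (pvResolveB d N res p.2 []).2 (out.insert p.1 (pvResolveB d N res p.2 []).1)
      hr.2 (fun q hq => hl q (List.mem_cons_of_mem _ hq))

-- ===== VERDICT (by name: the statement is the Claim_ definition above) =====
theorem compress_uuid_map_spec : Claim_equal_compress_uuid_map := by
  intro uuid_map _ hpre
  unfold Spec_compress_uuid_map compress_uuid_map compress_uuid_map_alt
  simp only []
  apply congrArg
  apply pvFold_eq (uuid_map.length + 1) uuid_map PySem.Dict.empty PySem.Dict.empty
    (pvInv_empty _)
  intro p hp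
  have h := hpre p hp
  rw [pvStable h 1]
  exact h
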